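-- pv_equiv track=rewrite | github.com/woowonjin/Code_Study | WONJIN/Week18/new_game_2.py | check
-- ===== SOURCE A (Python) =====
-- from collections import defaultdict
--
-- def check(horses):
--     cnt_dict = defaultdict(int)
--     for horse in horses:
--         key = tuple(horse[:2])
--         cnt_dict[key] += 1
--         if cnt_dict[key] >= 4:
--             return True
--     return False
-- ===== SOURCE B (Python) =====
-- def check(horses):
--     keys = sorted(tuple(horse[:2]) for horse in horses)
--     return any(keys[i] == keys[i + 3] for i in range(len(keys) - 3))
-- ===== Notes on version B (the rewrite author's own statement) =====
-- stated objective: alternative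
-- what changed: Replaces hash-counting with an early exit by sort-then-scan: sort the position keys lexicographically and report whether some key equals the key three places later (a run of 4 equal keys).
import Mathlib
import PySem

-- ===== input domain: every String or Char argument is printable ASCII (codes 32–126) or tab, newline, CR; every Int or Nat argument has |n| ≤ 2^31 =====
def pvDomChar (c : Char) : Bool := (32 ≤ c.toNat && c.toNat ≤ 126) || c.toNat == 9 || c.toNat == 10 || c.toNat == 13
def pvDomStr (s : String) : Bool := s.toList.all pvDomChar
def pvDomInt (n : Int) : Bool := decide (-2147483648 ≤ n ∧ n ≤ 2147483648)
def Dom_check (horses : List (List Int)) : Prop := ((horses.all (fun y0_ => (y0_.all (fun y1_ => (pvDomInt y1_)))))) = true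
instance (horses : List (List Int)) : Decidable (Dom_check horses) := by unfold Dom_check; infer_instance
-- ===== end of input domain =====

-- B replaces A's hash-counting pass by sort-then-scan: sort the keys, look for a run of 4 equal keys.

-- ===== PORT A =====
-- key = tuple(horse[:2])
def tupleKey (horse : List Int) : List Int := PySem.List.slice horse none (some 2)

-- A's for-loop with its early 'return True'; state = cnt_dict
def checkLoop (d : PySem.Dict (List Int) Int) : List (List Int) → Bool
  | [] => false
  | horse :: rest =>
    let key := tupleKey horse
    let d' := d.insert key (d.getD key 0 + 1)   -- cnt_dict[key] += 1 (defaultdict(int))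
    if 4 ≤ d'.getD key 0 then true else checkLoop d' rest

def check (horses : List (List Int)) : Bool := checkLoop PySem.Dict.empty horses

-- ===== PORT B =====
-- keys = sorted(tuple(horse[:2]) for horse in horses); Python's lexicographic tuple order
-- is Mathlib's lexicographic LinearOrder on List Int (chosen explicitly; Lean's default
-- List.instLT is the same order but not the instance the order lemmas are stated for).
def sortKeys (ks : List (List Int)) : List (List Int) :=
  @PySem.List.sorted (List Int) (List Int) Preorder.toLT LinearOrder.toDecidableLT
    ks (fun x => x) false

def check_alt (horses : List (List Int)) : Bool :=
  let keys := sortKeys (horses.map (fun horse => tupleKey horse))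
  (PySem.List.pyRange 0 ((keys.length : Int) - 3) 1).any
    (fun i => PySem.List.pyGet? keys i == PySem.List.pyGet? keys (i + 3))

-- ===== PRECONDITION & SPEC =====
def Spec_check (horses : List (List Int)) (out : Bool) : Prop := out = check_alt horses
instance (horses : List (List Int)) (out : Bool) : Decidable (Spec_check horses out) := by unfold Spec_check; infer_instance

-- ===== CLAIM (what is proved, stated in full; the proofs are below) =====
def Claim_equal_check : Prop := ∀ (horses : List (List Int)), Dom_check horses → Spec_check horses (check horses)

-- ===== LEMMAS AND PROOFS =====

-- A-side: the loop's dict, as a fold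
def countFold (d : PySem.Dict (List Int) Int) (ks : List (List Int)) : PySem.Dict (List Int) Int :=
  ks.foldl (fun d x => d.insert x (d.getD x 0 + 1)) d

lemma values_any_iff (d : PySem.Dict (List Int) Int) (hnd : d.keys.Nodup) :
    (d.values.any (fun v => decide (4 ≤ v)) = true) ↔ ∃ k ∈ d.keys, 4 ≤ d.getD k 0 := by
  rw [PySem.Dict.values_eq_map_keys d hnd 0]
  simp [List.any_eq_true]

lemma getD_countFold (d : PySem.Dict (List Int) Int) (ks : List (List Int)) (k : List Int) :
    (countFold d ks).getD k 0 = d.getD k 0 + ks.count k :=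
  PySem.Dict.getD_foldl_insert_add_one ks d k

lemma nodup_keys_countFold (d : PySem.Dict (List Int) Int) (ks : List (List Int))
    (hnd : d.keys.Nodup) : (countFold d ks).keys.Nodup :=
  PySem.Dict.nodup_keys_foldl_insert ks _ d hnd

lemma mem_keys_countFold (d : PySem.Dict (List Int) Int) (ks : List (List Int)) (k : List Int)
    (h : k ∈ d.keys) : k ∈ (countFold d ks).keys := by
  rw [countFold, PySem.Dict.keys_foldl_insert]
  exact (PySem.Set.mem_update _ _ _).mpr (Or.inl h)

lemma checkLoop_eq (hs : List (List Int)) (d : PySem.Dict (List Int) Int)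
    (hnd : d.keys.Nodup) (hlt : ∀ v ∈ d.values, v < 4) :
    checkLoop d hs = (countFold d (hs.map tupleKey)).values.any (fun v => decide (4 ≤ v)) := by
  induction hs generalizing d with
  | nil =>
    simp only [checkLoop, List.map_nil, countFold, List.foldl_nil]
    symm
    rw [List.any_eq_false]
    intro v hv
    simpa using Int.not_le.mpr (hlt v hv)
  | cons horse rest ih =>
    simp only [checkLoop, List.map_cons, countFold, List.foldl_cons]
    set key := tupleKey horse with hkey
    set d' := d.insert key (d.getD key 0 + 1) with hd'
    have hnd' : d'.keys.Nodup := PySem.Dict.nodup_keys_insert d key _ hnd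
    by_cases h4 : 4 ≤ d'.getD key 0
    · rw [if_pos h4]
      symm
      show (countFold d' (rest.map tupleKey)).values.any (fun v => decide (4 ≤ v)) = true
      rw [(values_any_iff _ (nodup_keys_countFold d' _ hnd'))]
      refine ⟨key, mem_keys_countFold d' _ key ?_, ?_⟩
      · exact (PySem.Dict.mem_keys_insert d key key _).mpr (Or.inl rfl)
      · rw [getD_countFold]
        have h0 : (0:Int) ≤ ((rest.map tupleKey).count key : Int) := Int.natCast_nonneg _
        omega
    · rw [if_neg h4]
      show checkLoop d' rest = (countFold d' (rest.map tupleKey)).values.any (fun v => decide (4 ≤ v))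
      refine ih d' hnd' ?_
      intro v hv
      rcases PySem.Dict.mem_values_insert d key _ v hv with h | h
      · rw [hd', PySem.Dict.getD_insert_self] at h4
        omega
      · exact hlt v h

-- every element of ks is a key of the fold's dict
lemma mem_keys_countFold_of_mem : ∀ (ks : List (List Int)) (d : PySem.Dict (List Int) Int)
    (k : List Int), k ∈ ks → k ∈ (countFold d ks).keys := by
  intro ks
  induction ks with
  | nil => intro d k hk; simp at hk
  | cons a t ih =>
    intro d k hk
    rw [countFold, List.foldl_cons]
    rcases List.mem_cons.mp hk with rfl | h
    · exact mem_keys_countFold _ t k ((PySem.Dict.mem_keys_insert _ _ _ _).mpr (Or.inl rfl))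
    · exact ih _ k h

lemma getD_empty (k : List Int) : (PySem.Dict.empty : PySem.Dict (List Int) Int).getD k 0 = 0 := by
  simp [PySem.Dict.getD, PySem.Dict.get?, PySem.Dict.empty]

-- A returns True iff some key occurs at least 4 times
lemma check_iff_count (horses : List (List Int)) :
    check horses = true ↔ ∃ k, 4 ≤ (horses.map tupleKey).count k := by
  rw [check, checkLoop_eq horses PySem.Dict.empty PySem.Dict.nodup_keys_empty
        (by simp [PySem.Dict.values, PySem.Dict.empty]),
      values_any_iff _ (nodup_keys_countFold _ _ PySem.Dict.nodup_keys_empty)]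
  constructor
  · rintro ⟨k, -, hk⟩
    rw [getD_countFold, getD_empty] at hk
    exact ⟨k, by omega⟩
  · rintro ⟨k, hk⟩
    have hmem : k ∈ horses.map tupleKey := by
      have : 0 < (horses.map tupleKey).count k := by omega
      exact List.count_pos_iff.mp this
    refine ⟨k, mem_keys_countFold_of_mem _ _ _ hmem, ?_⟩
    rw [getD_countFold, getD_empty]
    omega

-- generic sorted-run facts (any linear order)
lemma head_run {α : Type} [BEq α] [LawfulBEq α] [LinearOrder α] (k : α) :
    ∀ (l : List α), l.Pairwise (· ≤ ·) → l.head? = some k →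
      ∀ j < l.count k, l[j]? = some k := by
  intro l
  induction l with
  | nil => intro _ _ j hj; simp at hj
  | cons a t ih =>
    intro hp hh j hj
    obtain rfl : a = k := by simpa using hh
    rcases List.pairwise_cons.mp hp with ⟨hall, hpt⟩
    match j with
    | 0 => simp
    | Nat.succ j =>
      rw [List.count_cons_self] at hj
      have hjt : j < t.count a := by omega
      have hpos : 0 < t.count a := by omega
      have hkmem : a ∈ t := List.count_pos_iff.mp hpos
      cases t with
      | nil => simp at hpos
      | cons b t' =>
        have hbk : b = a := by
          have h1 : a ≤ b := hall b (by simp)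
          have h2 : b ≤ a := by
            rcases List.mem_cons.mp hkmem with h | h
            · exact h ▸ le_refl b
            · exact (List.pairwise_cons.mp hpt).1 a h
          exact le_antisymm h2 h1
        subst hbk
        have := ih hpt (by simp) j hjt
        simpa using this

lemma count_to_run {α : Type} [BEq α] [LawfulBEq α] [LinearOrder α] (k : α) :
    ∀ (l : List α), l.Pairwise (· ≤ ·) → 4 ≤ l.count k →
      ∃ i : Nat, i + 3 < l.length ∧ l[i]? = l[i+3]? := by
  intro l
  induction l with
  | nil => intro _ h; simp at h
  | cons a t ih =>
    intro hp h4
    by_cases hak : a = k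
    · subst hak
      have hlen : 4 ≤ (a :: t).length := le_trans h4 (List.count_le_length)
      have h0 := head_run a (a :: t) hp (by simp) 0 (by omega)
      have h3 := head_run a (a :: t) hp (by simp) 3 (by omega)
      exact ⟨0, by simp at hlen ⊢; omega, by rw [h0, h3]⟩
    · have hcnt : (a :: t).count k = t.count k := by
        rw [List.count_cons_of_ne hak]
      rcases ih (List.pairwise_cons.mp hp).2 (by omega) with ⟨i, hi, he⟩
      refine ⟨i + 1, by simp; omega, ?_⟩
      simpa [List.getElem?_cons_succ] using he

lemma run_to_count {α : Type} [BEq α] [LawfulBEq α] [LinearOrder α]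
    (l : List α) (hp : l.Pairwise (· ≤ ·)) (i : Nat) (h : i + 3 < l.length)
    (he : l[i]? = l[i+3]?) : ∃ k, 4 ≤ l.count k := by
  have hi : i < l.length := by omega
  rw [List.getElem?_eq_getElem hi, List.getElem?_eq_getElem h] at he
  have hk3 : l[i+3] = l[i] := (Option.some.inj he).symm
  have mono := List.pairwise_iff_getElem.mp hp
  have e1 : l[i+1]'(by omega) = l[i] := by
    have ha := mono i (i+1) hi (by omega) (by omega)
    have hb := mono (i+1) (i+3) (by omega) h (by omega)
    rw [hk3] at hb
    exact le_antisymm hb ha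
  have e2 : l[i+2]'(by omega) = l[i] := by
    have ha := mono i (i+2) hi (by omega) (by omega)
    have hb := mono (i+2) (i+3) (by omega) h (by omega)
    rw [hk3] at hb
    exact le_antisymm hb ha
  refine ⟨l[i], ?_⟩
  have hsub : ((l.drop i).take 4).Sublist l :=
    (List.take_sublist 4 _).trans (List.drop_sublist i l)
  have hrep : (l.drop i).take 4 = [l[i], l[i], l[i], l[i]] := by
    apply List.ext_getElem
    · simp
      omega
    · intro j hj1 hj2
      have hj4 : j < 4 := by simp at hj1; omega
      have hval : ((l.drop i).take 4)[j]'hj1 = l[i+j]'(by omega) := by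
        simp [List.getElem_take, List.getElem_drop]
      rw [hval]
      interval_cases j
      · simp
      · simpa using e1
      · simpa using e2
      · simpa using hk3
  have hcnt : ((l.drop i).take 4).count l[i] = 4 := by
    rw [hrep]
    simp
  calc (4 : Nat) = ((l.drop i).take 4).count l[i] := hcnt.symm
    _ ≤ l.count l[i] := hsub.count_le _

-- B returns True iff some key occurs at least 4 times
lemma check_alt_iff_count (horses : List (List Int)) :
    check_alt horses = true ↔ ∃ k, 4 ≤ (horses.map tupleKey).count k := by
  rw [check_alt]
  set keys := sortKeys (horses.map (fun horse => tupleKey horse)) with hkeys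
  have hperm : keys.Perm (horses.map tupleKey) := by
    rw [hkeys, sortKeys]
    exact @PySem.List.sorted_perm (List Int) (List Int) Preorder.toLT LinearOrder.toDecidableLT
      (horses.map (fun horse => tupleKey horse)) (fun x => x) false
  have hp : keys.Pairwise (· ≤ ·) := by
    rw [hkeys, sortKeys]
    apply PySem.List.sorted_pairwise
  rw [List.any_eq_true]
  constructor
  · rintro ⟨i, him, hbeq⟩
    rcases PySem.List.mem_pyRange_one.mp him with ⟨h0, hlt⟩
    have hjlen : i.toNat + 3 < keys.length := by omega
    have hg1 : PySem.List.pyGet? keys i = keys[i.toNat]? :=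
      PySem.List.pyGet?_of_nonneg _ h0
    have hg2 : PySem.List.pyGet? keys (i + 3) = keys[i.toNat + 3]? := by
      rw [PySem.List.pyGet?_of_nonneg _ (by omega)]
      congr 1
      omega
    rw [hg1, hg2] at hbeq
    have heq : keys[i.toNat]? = keys[i.toNat + 3]? := eq_of_beq hbeq
    rcases run_to_count keys hp i.toNat hjlen heq with ⟨k, hk⟩
    exact ⟨k, by rwa [hperm.count_eq] at hk⟩
  · rintro ⟨k, hk⟩
    rw [← hperm.count_eq] at hk
    rcases count_to_run k keys hp hk with ⟨j, hj, he⟩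
    refine ⟨(j : Int), PySem.List.mem_pyRange_one.mpr ⟨by omega, by omega⟩, ?_⟩
    have hg1 : PySem.List.pyGet? keys (j : Int) = keys[j]? := PySem.List.pyGet?_natCast _ _
    have hg2 : PySem.List.pyGet? keys ((j : Int) + 3) = keys[j + 3]? := by
      rw [show ((j : Int) + 3) = ((j + 3 : Nat) : Int) by omega]
      exact PySem.List.pyGet?_natCast _ _
    rw [hg1, hg2, he]
    exact beq_self_eq_true _

-- ===== VERDICT (by name: the statement is the Claim_ definition above) =====
theorem check_spec : Claim_equal_check := by
  intro horses _
  show check horses = check_alt horses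
  exact Bool.eq_iff_iff.mpr ((check_iff_count horses).trans (check_alt_iff_count horses).symm)
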